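-- pv_equiv track=rewrite | github.com/vhsw/Advent-of-Code | 2017/Day 06/memory_reallocation.py | part2
-- ===== SOURCE A (Python) =====
-- from itertools import count
--
-- def redistribute(blocks: list[int]):
--     blocks = blocks.copy()
--     max_val = max(blocks)
--     max_idx = blocks.index(max_val)
--     blocks[max_idx] = 0
--     val, rem = divmod(max_val, len(blocks))
--     blocks = [b + val for b in blocks]
--     while rem:
--         max_idx += 1
--         blocks[max_idx % len(blocks)] += 1
--         rem -= 1
--     return blocks
--
-- def part2(data: list[int]):
--     """Part 2 solution"""
--     seen = {tuple(data)}
--     while True: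
--         data = redistribute(data)
--         t_data = tuple(data)
--         if t_data in seen:
--             loop_mark = t_data
--             break
--         seen.add(tuple(t_data))
--     for loop_size in count(1):
--         data = redistribute(data)
--         if tuple(data) == loop_mark:
--             return loop_size
-- ===== SOURCE B (Python) =====
-- def redistribute(blocks: list[int]):
--     blocks = blocks.copy()
--     max_val = max(blocks)
--     max_idx = blocks.index(max_val)
--     blocks[max_idx] = 0
--     val, rem = divmod(max_val, len(blocks))
--     blocks = [b + val for b in blocks]
--     while rem:
--         max_idx += 1
--         blocks[max_idx % len(blocks)] += 1
--         rem -= 1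
--     return blocks
--
--
-- def part2(data: list[int]):
--     """Part 2 solution: one pass, dict state -> first step index."""
--     seen = {tuple(data): 0}
--     step = 0
--     while True:
--         data = redistribute(data)
--         step += 1
--         state = tuple(data)
--         if state in seen:
--             return step - seen[state]
--         seen[state] = step
-- ===== Notes on version B (the rewrite author's own statement) =====
-- stated objective: alternative
-- what changed: A detects a repeated state with a set and then re-simulates the redistribution to count the cycle length; B makes a single pass with a dict mapping each state to its first step index and returns step - seen[state] at the first repeat, eliminating the whole second simulation phase.
-- outside the precondition, e.g. on part2([]): A raises ValueError, B raises ValueError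
import Mathlib
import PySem

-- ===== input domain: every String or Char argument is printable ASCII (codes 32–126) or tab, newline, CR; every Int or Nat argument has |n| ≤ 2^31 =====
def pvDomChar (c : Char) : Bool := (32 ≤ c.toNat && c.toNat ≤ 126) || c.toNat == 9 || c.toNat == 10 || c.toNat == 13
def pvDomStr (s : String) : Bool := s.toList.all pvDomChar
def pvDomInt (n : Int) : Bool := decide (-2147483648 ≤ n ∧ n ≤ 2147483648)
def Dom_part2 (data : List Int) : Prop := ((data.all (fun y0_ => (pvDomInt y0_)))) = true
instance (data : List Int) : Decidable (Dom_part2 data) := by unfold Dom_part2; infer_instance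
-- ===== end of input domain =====

-- B collapses A's two phases (set-based cycle detection, then re-simulation to measure the loop)
-- into one pass over a dict mapping each state to its first step index (alternative decomposition).


-- ===== PORT A =====
-- shared helper 'redistribute' (both Pythons use it verbatim)
-- 'while rem: max_idx += 1; blocks[max_idx % len(blocks)] += 1; rem -= 1' (rem ≥ 0, counted down)
def pvRemLoop : List Int → Nat → Nat → List Int
  | blocks, _, 0 => blocks
  | blocks, maxIdx, r + 1 =>
      pvRemLoop (blocks.modify ((maxIdx + 1) % blocks.length) (· + 1)) (maxIdx + 1) r

def redistribute (blocks : List Int) : List Int :=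
  match PySem.List.max? blocks (fun b => b) with
  | none => []                                  -- max([]) raises ValueError; unreachable under Pre_
  | some maxVal =>
    let maxIdx := (PySem.List.index? blocks maxVal).getD 0
    let bs := blocks.set maxIdx 0
    match PySem.Int.divmod? maxVal (PySem.List.len bs) with
    | none => []                                -- divisor 0; unreachable under Pre_
    | some (val, rem) => pvRemLoop (bs.map (fun b => b + val)) maxIdx rem.toNat

-- fuel making the 'while True' / 'count(1)' loops total (same bound in both ports)
def pvFuel : Nat := 1000000000000000000

-- A, phase 1: redistribute until the state is in 'seen'; return the repeated state (loop_mark)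
def pvLoopA : PySem.Set (List Int) → List Int → Nat → Option (List Int)
  | _, _, 0 => none
  | seen, data, f + 1 =>
    if PySem.Set.contains seen (redistribute data) then some (redistribute data)
    else pvLoopA (PySem.Set.add seen (redistribute data)) (redistribute data) f

-- A, phase 2: 'for loop_size in count(1)': redistribute until the state equals loop_mark
def pvPhase2 : List Int → List Int → Int → Nat → Option Int
  | _, _, _, 0 => none
  | data, mark, loopSize, f + 1 =>
    if redistribute data = mark then some loopSize
    else pvPhase2 (redistribute data) mark (loopSize + 1) f

def part2 (data : List Int) : Int :=
  match pvLoopA (PySem.Set.ofList [data]) data pvFuel with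
  | none => 0
  | some mark => (pvPhase2 mark mark 1 pvFuel).getD 0

-- ===== PORT B =====
-- B: one pass; dict maps each seen state to the step index at which it first appeared
def pvLoopB : PySem.Dict (List Int) Int → List Int → Int → Nat → Int
  | _, _, _, 0 => 0
  | seen, data, step, f + 1 =>
    match seen.get? (redistribute data) with
    | some j => (step + 1) - j
    | none => pvLoopB (seen.insert (redistribute data) (step + 1)) (redistribute data) (step + 1) f

def part2_alt (data : List Int) : Int :=
  pvLoopB ((PySem.Dict.empty).insert data 0) data 0 pvFuel

-- ===== PRECONDITION & SPEC =====
-- Pre_ excludes only the empty list, on which Python A raises ValueError (max() of empty sequence).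
def Pre_part2 (data : List Int) : Prop := data ≠ []
instance (data : List Int) : Decidable (Pre_part2 data) := by unfold Pre_part2; infer_instance
def pvWitness_part2 : List Int := [0, 2, 7, 0]

def Spec_part2 (data : List Int) (out : Int) : Prop := out = part2_alt data
instance (data : List Int) (out : Int) : Decidable (Spec_part2 data out) := by unfold Spec_part2; infer_instance

-- ===== CLAIM (what is proved, stated in full; the proofs are below) =====
def Claim_equal_part2 : Prop := ∀ (data : List Int), Dom_part2 data → Pre_part2 data → Spec_part2 data (part2 data)

-- ===== LEMMAS AND PROOFS =====

-- phase 2 returns k₀, the least k ≥ 1 with redistribute^[k] mark = mark, once enough fuel is given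
lemma pvPhase2_finds (mark : List Int) (k₀ : Nat)
    (hmark : redistribute^[k₀] mark = mark)
    (hmin : ∀ k, 0 < k → k < k₀ → redistribute^[k] mark ≠ mark) :
    ∀ (fuel i : Nat), i < k₀ → k₀ ≤ i + fuel →
      pvPhase2 (redistribute^[i] mark) mark ((i : Int) + 1) fuel = some (k₀ : Int) := by
  intro fuel
  induction fuel with
  | zero => intro i h1 h2; omega
  | succ f ih =>
    intro i h1 h2
    have hd : redistribute (redistribute^[i] mark) = redistribute^[i + 1] mark :=
      (Function.iterate_succ_apply' redistribute i mark).symm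
    simp only [pvPhase2, hd]
    by_cases hco : i + 1 = k₀
    · rw [hco, hmark, if_pos rfl]
      congr 1
      omega
    · have hlt : i + 1 < k₀ := by omega
      rw [if_neg (hmin (i + 1) (by omega) hlt)]
      have h3 : ((i : Int) + 1) + 1 = (((i + 1 : Nat) : Int)) + 1 := by push_cast; ring
      rw [h3]
      exact ih (i + 1) hlt (by omega)

-- the main invariant induction: A's phase-1+phase-2 pipeline equals B's single pass
lemma pvLoop_eq : ∀ (fuel step : Nat) (d0 : List Int) (dict : PySem.Dict (List Int) Int)
    (seen : PySem.Set (List Int)),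
    dict.items = (List.range (step + 1)).map (fun i => (redistribute^[i] d0, (i : Int))) →
    seen = (List.range (step + 1)).map (fun i => redistribute^[i] d0) →
    (∀ i j, i ≤ step → j ≤ step → redistribute^[i] d0 = redistribute^[j] d0 → i = j) →
    step + fuel ≤ pvFuel →
    (match pvLoopA seen (redistribute^[step] d0) fuel with
     | none => 0
     | some mark => (pvPhase2 mark mark 1 pvFuel).getD 0)
      = pvLoopB dict (redistribute^[step] d0) (step : Int) fuel := by
  intro fuel
  induction fuel with
  | zero =>
    intro step d0 dict seen _ _ _ _
    simp [pvLoopA, pvLoopB]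
  | succ f ih =>
    intro step d0 dict seen hitems hseen hdist hfuel
    have hd : redistribute (redistribute^[step] d0) = redistribute^[step + 1] d0 :=
      (Function.iterate_succ_apply' redistribute step d0).symm
    have hkeys : dict.keys = (List.range (step + 1)).map (fun i => redistribute^[i] d0) := by
      simp only [PySem.Dict.keys, hitems, List.map_map]
      rfl
    have hnodup : dict.keys.Nodup := by
      rw [hkeys]
      refine List.Nodup.map_on ?_ List.nodup_range
      intro x hx y hy hxy
      exact hdist x y (by simpa [Nat.lt_succ_iff] using List.mem_range.mp hx)
        (by simpa [Nat.lt_succ_iff] using List.mem_range.mp hy) hxy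
    by_cases hmem : ∃ i, i ≤ step ∧ redistribute^[step + 1] d0 = redistribute^[i] d0
    · obtain ⟨i, hi, hdi⟩ := hmem
      have hcontains : PySem.Set.contains seen (redistribute^[step + 1] d0) = true := by
        refine (PySem.Set.contains_iff seen _).mpr ?_
        rw [hseen]
        exact List.mem_map.mpr ⟨i, List.mem_range.mpr (by omega), hdi.symm⟩
      have hget : dict.get? (redistribute^[step + 1] d0) = some (i : Int) := by
        rw [hdi]
        exact PySem.Dict.get?_of_mem_items dict
          (by rw [hitems]; exact List.mem_map.mpr ⟨i, List.mem_range.mpr (by omega), rfl⟩) hnodup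
      simp only [pvLoopA, pvLoopB, hd, hcontains, hget, if_true]
      have hmark : redistribute^[step + 1 - i] (redistribute^[step + 1] d0)
          = redistribute^[step + 1] d0 := by
        rw [hdi, ← Function.iterate_add_apply]
        have he : step + 1 - i + i = step + 1 := by omega
        rw [he, hdi]
      have hmin : ∀ k, 0 < k → k < step + 1 - i →
          redistribute^[k] (redistribute^[step + 1] d0) ≠ redistribute^[step + 1] d0 := by
        intro k hk1 hk2 hcontra
        rw [hdi, ← Function.iterate_add_apply] at hcontra
        have := hdist (k + i) i (by omega) hi hcontra
        omega
      have hph := pvPhase2_finds (redistribute^[step + 1] d0) (step + 1 - i)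
        hmark hmin pvFuel 0 (by omega) (by omega)
      simp only [Function.iterate_zero_apply, Nat.cast_zero, zero_add] at hph
      rw [hph]
      simp only [Option.getD_some]
      rw [Nat.cast_sub (by omega : i ≤ step + 1)]
      push_cast
      ring
    · simp only [not_exists, not_and] at hmem
      have hnotmem : redistribute^[step + 1] d0 ∉
          (List.range (step + 1)).map (fun i => redistribute^[i] d0) := by
        intro hm
        obtain ⟨j, hjr, hjeq⟩ := List.mem_map.mp hm
        exact hmem j (by simpa [Nat.lt_succ_iff] using List.mem_range.mp hjr) hjeq.symm
      have hnot' : redistribute^[step + 1] d0 ∉ seen := by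
        rw [hseen]; exact hnotmem
      have hcontains : PySem.Set.contains seen (redistribute^[step + 1] d0) = false := by
        cases hb : PySem.Set.contains seen (redistribute^[step + 1] d0) with
        | false => rfl
        | true => exact absurd ((PySem.Set.contains_iff seen _).mp hb) hnot' 
      have hget : dict.get? (redistribute^[step + 1] d0) = none := by
        rw [PySem.Dict.get?_eq_none_iff_not_mem_keys, hkeys]
        exact hnotmem
      have hcontF : dict.contains (redistribute^[step + 1] d0) = false := by
        rw [PySem.Dict.contains_eq_isSome_get?, hget]
        rfl
      have hadd : PySem.Set.add seen (redistribute^[step + 1] d0) =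
          seen ++ [redistribute^[step + 1] d0] := by
        unfold PySem.Set.add
        split
        · next hcond => exact absurd ((PySem.Set.contains_iff seen _).mp hcond) hnot'
        · rfl
      simp only [pvLoopA, pvLoopB, hd, hcontains, hget]
      have hc1 : ((step : Int) + 1) = ((step + 1 : Nat) : Int) := by push_cast; ring
      rw [hc1, hadd]
      exact ih (step + 1) d0 _ _
        (by
          rw [PySem.Dict.items_insert_of_not_contains _ _ hcontF, hitems]
          conv_rhs => rw [List.range_succ]
          rw [List.map_append]
          simp)
        (by
          rw [hseen]
          conv_rhs => rw [List.range_succ]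
          rw [List.map_append]
          simp)
        (by
          intro a b ha hb heq
          by_cases ha' : a ≤ step <;> by_cases hb' : b ≤ step
          · exact hdist a b ha' hb' heq
          · have : b = step + 1 := by omega
            subst this
            exact absurd heq.symm (hmem a ha')
          · have : a = step + 1 := by omega
            subst this
            exact absurd heq (hmem b hb')
          · omega)
        (by omega)

-- ===== VERDICT (by name: the statement is the Claim_ definition above) =====
theorem part2_spec : Claim_equal_part2 := by
  intro data _hdom _hpre
  unfold Spec_part2
  have h := pvLoop_eq pvFuel 0 data ((PySem.Dict.empty).insert data 0) (PySem.Set.ofList [data])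
      (by rw [PySem.Dict.items_insert_of_not_contains _ _ (by simp)]; simp [PySem.Dict.empty])
      (by simp [PySem.Set.ofList, PySem.Set.add, PySem.Set.empty, PySem.Set.contains])
      (by intro i j hi hj _; omega)
      (by omega)
  simpa [part2, part2_alt] using h
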